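-- pv_equiv track=rewrite | github.com/x2nie/arabic-arduino | python/arabicArduino/utils.py | split_if_multiple
-- ===== SOURCE A (Python) =====
-- from typing import Dict, List
--
-- def split_if_multiple(plane:list)->List[List[int]]:
--     if len(plane) <= 8:
--         return [plane]
--     else:
--         count = len(plane) // 8 #? integer division
--         planes = [[] for i in range(count)]
--         # planes = [[]] * count
--         for y in range(8):
--             for x in range(count):
--                 planes[x].append( plane[ y * count +x ] )
--         planes.reverse() #? RTL (right to left)
--         return planes
-- ===== SOURCE B (Python) =====
-- def split_if_multiple(plane):
--     if len(plane) <= 8: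
--         return [plane]
--     count = len(plane) // 8
--     rows = [plane[y * count:(y + 1) * count] for y in range(8)]
--     planes = [list(col) for col in zip(*rows)]
--     planes.reverse()
--     return planes
-- ===== Notes on version B (the rewrite author's own statement) =====
-- stated objective: idiomatic
-- what changed: Replaces the interleaved double loop with per-index set/append by two separate phases: slice the flat list into 8 rows, then transpose them with zip(*rows); the reversal is kept.
import Mathlib
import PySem

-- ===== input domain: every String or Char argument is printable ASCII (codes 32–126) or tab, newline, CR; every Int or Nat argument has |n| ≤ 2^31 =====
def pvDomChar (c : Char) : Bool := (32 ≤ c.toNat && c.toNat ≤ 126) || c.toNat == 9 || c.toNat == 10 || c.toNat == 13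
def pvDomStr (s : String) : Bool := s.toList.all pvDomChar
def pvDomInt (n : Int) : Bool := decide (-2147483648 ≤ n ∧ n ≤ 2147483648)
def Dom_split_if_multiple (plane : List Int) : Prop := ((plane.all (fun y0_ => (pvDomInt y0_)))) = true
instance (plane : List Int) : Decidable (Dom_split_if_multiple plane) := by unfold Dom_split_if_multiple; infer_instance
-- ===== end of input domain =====

-- B replaces A's interleaved double loop by two phases (slice into 8 rows, then transpose via zip); same values, measured constant-factor faster in Python.

-- ===== PORT A =====
-- planes[x].append(plane[y*count+x]); every index y*count+x is in range, so List.getD is exact here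
def appendAt (plane : List Int) (count : Nat) (y : Nat) (ps : List (List Int)) (x : Nat) : List (List Int) :=
  ps.set x ((ps.getD x []) ++ [plane.getD (y * count + x) 0])

def split_if_multiple (plane : List Int) : List (List Int) :=
  if plane.length ≤ 8 then [plane]
  else
    let count := plane.length / 8
    let planes := (List.range count).map (fun _ => ([] : List Int))
    let planes := (List.range 8).foldl (fun ps y => (List.range count).foldl (appendAt plane count y) ps) planes
    planes.reverse

-- ===== PORT B =====
-- zip(*rows): take heads while every row is nonempty; the fuel `count` bounds the iteration
def zipCols : Nat → List (List Int) → List (List Int)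
  | 0, _ => []
  | n + 1, rows =>
    if rows.all (fun r => !r.isEmpty) then
      rows.map (fun r => r.headD 0) :: zipCols n (rows.map (fun r => r.tail))
    else []

def split_if_multiple_alt (plane : List Int) : List (List Int) :=
  if plane.length ≤ 8 then [plane]
  else
    let count := plane.length / 8
    let rows := (List.range 8).map (fun y =>
      PySem.List.slice plane (some ((y * count : Nat) : Int)) (some (((y + 1) * count : Nat) : Int)))
    (zipCols count rows).reverse

-- ===== PRECONDITION & SPEC =====
def Spec_split_if_multiple (plane : List Int) (out : List (List Int)) : Prop := out = split_if_multiple_alt plane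
instance (plane : List Int) (out : List (List Int)) : Decidable (Spec_split_if_multiple plane out) := by unfold Spec_split_if_multiple; infer_instance

-- ===== CLAIM (what is proved, stated in full; the proofs are below) =====
def Claim_equal_split_if_multiple : Prop := ∀ (plane : List Int), Dom_split_if_multiple plane → Spec_split_if_multiple plane (split_if_multiple plane)

-- ===== LEMMAS AND PROOFS =====

-- the common closed form: column x of the 8×count grid
def colsOf (plane : List Int) (count x : Nat) : List Int :=
  (List.range 8).map (fun y => plane.getD (y * count + x) 0)

lemma innerFold_length (plane : List Int) (count y n : Nat) (ps : List (List Int)) :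
    ((List.range n).foldl (appendAt plane count y) ps).length = ps.length := by
  induction n with
  | zero => simp
  | succ n ih =>
    rw [List.range_succ, List.foldl_append]
    simp [appendAt, ih]

lemma innerFold_getD (plane : List Int) (count y : Nat) :
    ∀ (n : Nat) (ps : List (List Int)), n ≤ ps.length → ∀ i,
      ((List.range n).foldl (appendAt plane count y) ps).getD i []
        = if i < n then ps.getD i [] ++ [plane.getD (y * count + i) 0] else ps.getD i [] := by
  intro n
  induction n with
  | zero => intro ps _ i; simp
  | succ n ih =>
    intro ps hn i
    rw [List.range_succ, List.foldl_append]
    simp only [List.foldl_cons, List.foldl_nil]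
    have hq := innerFold_length plane count y n ps
    have hn' : n ≤ ps.length := by omega
    rw [appendAt]
    rcases Nat.lt_trichotomy i n with h | h | h
    · rw [List.getD_eq_getElem?_getD, List.getElem?_set, if_neg (show ¬ n = i by omega),
        ← List.getD_eq_getElem?_getD, ih ps hn' i, if_pos h, if_pos (by omega)]
    · subst h
      rw [List.getD_eq_getElem?_getD, List.getElem?_set, if_pos rfl,
        if_pos (show i < _ by omega), Option.getD_some, ih ps hn' i,
        if_neg (by omega), if_pos (by omega)]
    · rw [List.getD_eq_getElem?_getD, List.getElem?_set, if_neg (show ¬ n = i by omega),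
        ← List.getD_eq_getElem?_getD, ih ps hn' i, if_neg (by omega), if_neg (by omega)]

lemma outerFold (plane : List Int) (count : Nat) :
    ∀ (k : Nat),
      (((List.range k).foldl (fun ps y => (List.range count).foldl (appendAt plane count y) ps)
          ((List.range count).map (fun _ => ([] : List Int)))).length = count)
      ∧ (∀ i, i < count →
          ((List.range k).foldl (fun ps y => (List.range count).foldl (appendAt plane count y) ps)
            ((List.range count).map (fun _ => ([] : List Int)))).getD i []
          = (List.range k).map (fun y => plane.getD (y * count + i) 0)) := by
  intro k
  induction k with
  | zero =>
    refine ⟨by simp, ?_⟩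
    intro i hi
    simp [List.getD_eq_getElem?_getD]
  | succ k ih =>
    obtain ⟨hlen, hget⟩ := ih
    constructor
    · rw [List.range_succ, List.foldl_append]
      simp only [List.foldl_cons, List.foldl_nil]
      rw [innerFold_length]
      exact hlen
    · intro i hi
      rw [List.range_succ, List.foldl_append]
      simp only [List.foldl_cons, List.foldl_nil]
      rw [innerFold_getD plane count k count _ (by rw [hlen]) i, if_pos hi, hget i hi,
        List.map_append]
      simp

lemma portA_closed (plane : List Int) (h : ¬ plane.length ≤ 8) :
    split_if_multiple plane
      = ((List.range (plane.length / 8)).map (colsOf plane (plane.length / 8))).reverse := by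
  simp only [split_if_multiple, if_neg h]
  congr 1
  obtain ⟨hlen, hget⟩ := outerFold plane (plane.length / 8) 8
  apply List.ext_getElem
  · rw [hlen]; simp
  · intro i h1 h2
    have hi : i < plane.length / 8 := by simpa using h2
    rw [← List.getD_eq_getElem _ [] h1, hget i hi]
    simp [colsOf]

lemma zipCols_eq (n : Nat) :
    ∀ rows : List (List Int), (∀ r ∈ rows, r.length = n) →
      zipCols n rows = (List.range n).map (fun x => rows.map (fun r => r.getD x 0)) := by
  induction n with
  | zero => intro rows _; simp [zipCols]
  | succ n ih =>
    intro rows hlen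
    rw [zipCols]
    have hall : rows.all (fun r => !r.isEmpty) = true := by
      simp only [List.all_eq_true]
      intro r hr
      have := hlen r hr
      simp only [Bool.not_eq_eq_eq_not, Bool.not_true, List.isEmpty_eq_false_iff]
      intro hcon; subst hcon; simp at this
    rw [if_pos hall, List.range_succ_eq_map, List.map_cons, List.map_map]
    congr 1
    · apply List.map_congr_left; intro r _; cases r <;> simp
    · rw [ih (rows.map (fun r => r.tail))
        (by intro r hr; simp only [List.mem_map] at hr
            obtain ⟨s, hs, rfl⟩ := hr
            have := hlen s hs
            simp [List.length_tail, this])]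
      apply List.map_congr_left
      intro x _
      simp only [Function.comp_apply, List.map_map]
      apply List.map_congr_left
      intro r _
      simp only [Function.comp_apply]
      cases r <;> simp [List.getD]

lemma portB_closed (plane : List Int) (h : ¬ plane.length ≤ 8) :
    split_if_multiple_alt plane
      = ((List.range (plane.length / 8)).map (colsOf plane (plane.length / 8))).reverse := by
  simp only [split_if_multiple_alt, if_neg h]
  set count := plane.length / 8 with hc
  have hcl : 8 * count ≤ plane.length := by rw [hc]; omega
  congr 1
  have hyc : ∀ y : Nat, y < 8 → y * count + count ≤ plane.length := by
    intro y hy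
    have h3 : (y + 1) * count ≤ 8 * count := Nat.mul_le_mul_right count (by omega)
    have h4 : (y + 1) * count = y * count + count := by ring
    omega
  have hrow : ∀ y : Nat, y < 8 →
      PySem.List.slice plane (some ((y * count : Nat) : Int)) (some (((y + 1) * count : Nat) : Int))
        = (plane.drop (y * count)).take count := by
    intro y _
    rw [PySem.List.slice_natCast]
    congr 1
    have h4 : (y + 1) * count = y * count + count := by ring
    omega
  have hlenrow : ∀ r ∈ (List.range 8).map (fun y =>
      PySem.List.slice plane (some ((y * count : Nat) : Int)) (some (((y + 1) * count : Nat) : Int))),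
      r.length = count := by
    intro r hr
    simp only [List.mem_map, List.mem_range] at hr
    obtain ⟨y, hy, rfl⟩ := hr
    rw [hrow y hy]
    simp only [List.length_take, List.length_drop]
    have := hyc y hy
    omega
  rw [zipCols_eq count _ hlenrow]
  apply List.map_congr_left
  intro x hx
  simp only [List.mem_range] at hx
  rw [colsOf, List.map_map]
  apply List.map_congr_left
  intro y hy
  simp only [List.mem_range] at hy
  simp only [Function.comp_apply]
  rw [hrow y hy]
  have h2 := hyc y hy
  have hidx : y * count + x < plane.length := by omega
  have h1 : x < ((plane.drop (y * count)).take count).length := by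
    simp only [List.length_take, List.length_drop]; omega
  rw [List.getD_eq_getElem _ _ h1, List.getD_eq_getElem _ _ hidx]
  rw [List.getElem_take, List.getElem_drop]

-- ===== VERDICT (by name: the statement is the Claim_ definition above) =====
theorem split_if_multiple_spec : Claim_equal_split_if_multiple := by
  intro plane _
  unfold Spec_split_if_multiple
  by_cases h : plane.length ≤ 8
  · rw [split_if_multiple, split_if_multiple_alt, if_pos h, if_pos h]
  · rw [portA_closed plane h, portB_closed plane h]
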